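-- pv_equiv track=rewrite | github.com/flbdx/AoC_2024 | day_01.py | work_p2
-- ===== SOURCE A (Python) =====
-- def read_inputs(inputs):
--     ll, lr = [], []
--     for line in inputs:
--         line = line.strip()
--         if len(line) == 0:
--             continue
--         l, r = map(int, line.split())
--         ll.append(l)
--         lr.append(r)
--     return ll, lr
--
-- def work_p2(inputs):
--     from collections import Counter
--     ll, lr = read_inputs(inputs)
--
--     cr = Counter(lr)
--
--     s = 0
--     for n in ll:
--         s += n * cr.get(n, 0)
--     return s
-- ===== SOURCE B (Python) =====
-- def read_inputs(inputs):
--     ll, lr = [], []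
--     for line in inputs:
--         line = line.strip()
--         if len(line) == 0:
--             continue
--         l, r = map(int, line.split())
--         ll.append(l)
--         lr.append(r)
--     return ll, lr
--
-- def work_p2(inputs):
--     # sort both lists, then a two-pointer merge over equal runs: no hash table at all
--     ll, lr = read_inputs(inputs)
--     a = sorted(ll)
--     b = sorted(lr)
--     s = 0
--     i = 0
--     j = 0
--     while i < len(a):
--         v = a[i]
--         ca = 0
--         while i < len(a) and a[i] == v:
--             ca += 1
--             i += 1
--         while j < len(b) and b[j] < v:
--             j += 1
--         cb = 0
--         while j < len(b) and b[j] == v: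
--             cb += 1
--             j += 1
--         s += v * ca * cb
--     return s
-- ===== Notes on version B (the rewrite author's own statement) =====
-- stated objective: alternative
-- what changed: B replaces A's hash-based Counter lookup with a sort-then-merge algorithm: it sorts both parsed lists and walks them with two pointers, matching equal runs and adding value * left-run-length * right-run-length.
import Mathlib
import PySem

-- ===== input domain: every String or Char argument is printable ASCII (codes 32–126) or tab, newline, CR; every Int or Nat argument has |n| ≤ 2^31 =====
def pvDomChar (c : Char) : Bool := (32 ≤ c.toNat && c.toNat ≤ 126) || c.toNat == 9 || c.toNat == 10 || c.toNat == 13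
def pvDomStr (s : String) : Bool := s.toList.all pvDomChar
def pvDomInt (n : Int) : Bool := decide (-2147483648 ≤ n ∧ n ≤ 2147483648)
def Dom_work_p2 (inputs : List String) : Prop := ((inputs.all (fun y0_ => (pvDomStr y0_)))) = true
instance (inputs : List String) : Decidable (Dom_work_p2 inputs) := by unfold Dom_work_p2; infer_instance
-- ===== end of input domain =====

-- B sorts both parsed lists and sums over equal runs with a two-pointer merge instead of A's Counter lookup; exact on Pre_ (inputs where A raises no exception).

-- ===== PORT A =====
-- read_inputs (module helper shared by both Pythons): Option state, none = a raise inside map(int, …)/unpacking (excluded by Pre_)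
def readInputs (inputs : List String) : Option (List Int × List Int) :=
  inputs.foldl
    (fun st line =>
      match st with
      | none => none
      | some (ll, lr) =>
        if PySem.Str.len (PySem.Str.strip line) = 0 then some (ll, lr)
        else
          match (PySem.Str.split₀ (PySem.Str.strip line)).map PySem.Int.ofStr? with
          | [some l, some r] => some (ll ++ [l], lr ++ [r])
          | _ => none)
    (some ([], []))

def work_p2 (inputs : List String) : Int :=
  match readInputs inputs with
  | none => 0   -- unreachable under Pre_ (Python raises here)
  | some (ll, lr) =>
    let cr := PySem.Dict.counter lr
    ll.foldl (fun s n => s + n * cr.getD n 0) 0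

-- ===== PORT B =====
-- the outer while loop of B: each iteration consumes the run of a's head (inner
-- whiles counting runs become takeWhile/dropWhile over the same suffixes)
def mergeRuns : List Int → List Int → Int
  | [], _ => 0
  | v :: t, b =>
    let ca := ((v :: t).takeWhile (fun x => x == v)).length
    let a' := (v :: t).dropWhile (fun x => x == v)
    let b1 := b.dropWhile (fun x => decide (x < v))
    let cb := (b1.takeWhile (fun x => x == v)).length
    let b' := b1.dropWhile (fun x => x == v)
    v * (ca : Int) * (cb : Int) + mergeRuns a' b'
termination_by a _ => a.length
decreasing_by
  calc (List.dropWhile (fun x => x == v) (v :: t)).length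
      = (List.dropWhile (fun x => x == v) t).length := by simp [List.dropWhile]
    _ ≤ t.length := List.length_dropWhile_le _ _
    _ < (v :: t).length := by simp

def work_p2_alt (inputs : List String) : Int :=
  match readInputs inputs with
  | none => 0   -- unreachable under Pre_ (Python raises here)
  | some (ll, lr) =>
    mergeRuns (PySem.List.sorted ll (fun x => x) false)
              (PySem.List.sorted lr (fun x => x) false)

-- ===== PRECONDITION & SPEC =====
-- Pre_ excludes exactly the inputs on which Python A raises: a non-blank line that does not
-- consist of exactly two int()-parsable whitespace-separated tokens (ValueError / unpacking error).
def Pre_work_p2 (inputs : List String) : Prop :=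
  ∀ line ∈ inputs,
    PySem.Str.len (PySem.Str.strip line) = 0 ∨
    ((PySem.Str.split₀ (PySem.Str.strip line)).length = 2 ∧
      ∀ t ∈ PySem.Str.split₀ (PySem.Str.strip line), (PySem.Int.ofStr? t).isSome)
instance (inputs : List String) : Decidable (Pre_work_p2 inputs) := by
  unfold Pre_work_p2; infer_instance

def pvWitness_work_p2 : List String := ["37 33", "4 2", "30 18", "-9 33", "51 26"]

def Spec_work_p2 (inputs : List String) (out : Int) : Prop := out = work_p2_alt inputs
instance (inputs : List String) (out : Int) : Decidable (Spec_work_p2 inputs out) := by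
  unfold Spec_work_p2; infer_instance

-- ===== CLAIM (what is proved, stated in full; the proofs are below) =====
def Claim_equal_work_p2 : Prop :=
  ∀ (inputs : List String), Dom_work_p2 inputs → Pre_work_p2 inputs →
    Spec_work_p2 inputs (work_p2 inputs)

-- ===== LEMMAS AND PROOFS =====

-- parse of one line: some (l, r) = a data line, none = blank line (or a raise, excluded by Pre_)
def parseLine (line : String) : Option (Int × Int) :=
  match (PySem.Str.split₀ (PySem.Str.strip line)).map PySem.Int.ofStr? with
  | [some l, some r] => some (l, r)
  | _ => none

theorem parseLine_of_blank {line : String}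
    (h : PySem.Str.len (PySem.Str.strip line) = 0) :
    PySem.Str.split₀ (PySem.Str.strip line) = [] := by
  have hl : (PySem.Str.strip line).toList = [] := by
    have := PySem.Str.len_eq (PySem.Str.strip line)
    rw [this] at h
    exact List.eq_nil_of_length_eq_zero (by simpa [PySem.Chars.len] using h)
  have hm : (PySem.Str.split₀ (PySem.Str.strip line)).map String.toList
      = PySem.Chars.split₀ (PySem.Str.strip line).toList := by simp
  rw [hl] at hm
  have h0 : PySem.Chars.split₀ ([] : List Char) = [] := rfl
  rw [h0] at hm
  exact List.map_eq_nil_iff.mp hm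

theorem parseLine_shape {line : String}
    (h : (PySem.Str.split₀ (PySem.Str.strip line)).length = 2)
    (hp : ∀ t ∈ PySem.Str.split₀ (PySem.Str.strip line), (PySem.Int.ofStr? t).isSome) :
    ∃ t1 t2 l r, PySem.Str.split₀ (PySem.Str.strip line) = [t1, t2] ∧
      PySem.Int.ofStr? t1 = some l ∧ PySem.Int.ofStr? t2 = some r ∧
      parseLine line = some (l, r) := by
  match hts : PySem.Str.split₀ (PySem.Str.strip line) with
  | [t1, t2] =>
    have h1 := hp t1 (by rw [hts]; simp)
    have h2 := hp t2 (by rw [hts]; simp)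
    obtain ⟨l, hl⟩ := Option.isSome_iff_exists.mp h1
    obtain ⟨r, hr⟩ := Option.isSome_iff_exists.mp h2
    exact ⟨t1, t2, l, r, rfl, hl, hr, by unfold parseLine; rw [hts]; simp [hl, hr]⟩
  | [] => rw [hts] at h; simp at h
  | [t] => rw [hts] at h; simp at h
  | t1 :: t2 :: t3 :: ts => rw [hts] at h; simp at h

theorem readInputs_eq (inputs : List String) (h : Pre_work_p2 inputs) :
    ∀ ll lr,
      inputs.foldl
        (fun (st : Option (List Int × List Int)) line =>
          match st with
          | none => none
          | some (ll, lr) =>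
            if PySem.Str.len (PySem.Str.strip line) = 0 then some (ll, lr)
            else
              match (PySem.Str.split₀ (PySem.Str.strip line)).map PySem.Int.ofStr? with
              | [some l, some r] => some (ll ++ [l], lr ++ [r])
              | _ => none)
        (some (ll, lr))
      = some (ll ++ (inputs.filterMap parseLine).map Prod.fst,
              lr ++ (inputs.filterMap parseLine).map Prod.snd) := by
  induction inputs with
  | nil => intro ll lr; simp
  | cons line rest ih =>
    intro ll lr
    have hrest : Pre_work_p2 rest := fun l hl => h l (by simp [hl])
    rcases h line (by simp) with hb | ⟨h2, hp⟩
    · have hsp := parseLine_of_blank hb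
      have hpl : parseLine line = none := by unfold parseLine; rw [hsp]; rfl
      simp only [List.foldl_cons, List.filterMap_cons, hpl, hb, if_true]
      exact ih hrest ll lr
    · obtain ⟨t1, t2, l, r, hts, hl, hr, hpl⟩ := parseLine_shape h2 hp
      have hne : ¬ (PySem.Str.len (PySem.Str.strip line) = 0) := by
        intro hb
        rw [parseLine_of_blank hb] at hts; simp at hts
      simp only [List.foldl_cons, List.filterMap_cons, hpl, hts, List.map_cons,
        List.map_nil, hl, hr, if_neg hne]
      rw [ih hrest (ll ++ [l]) (lr ++ [r])]
      simp

-- the heart of the proof: on sorted lists, the two-pointer merge computes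
-- Σ_{n ∈ a} n * (count of n in b)
-- elements surviving dropWhile (== v) in a sorted list all exceed v
theorem dropWhile_eq_gt (v : Int) (l : List Int) (hl : l.Pairwise (· ≤ ·))
    (hall : ∀ x ∈ l, v ≤ x) :
    ∀ x ∈ l.dropWhile (fun x => x == v), v < x := by
  induction l with
  | nil => simp
  | cons h t ih =>
    rcases List.pairwise_cons.mp hl with ⟨hht, ht⟩
    by_cases hv : h = v
    · rw [List.dropWhile_cons_of_pos (by simp [hv])]
      exact ih ht (fun x hx => hall x (List.mem_cons_of_mem _ hx))
    · rw [List.dropWhile_cons_of_neg (by simp [hv])]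
      intro x hx
      have hvh : v < h := lt_of_le_of_ne (hall h List.mem_cons_self) (Ne.symm hv)
      rcases List.mem_cons.mp hx with rfl | hx'
      · exact hvh
      · exact lt_of_lt_of_le hvh (hht x hx')

-- elements surviving dropWhile (< v) in a sorted list are all ≥ v
theorem dropWhile_lt_ge (v : Int) (l : List Int) (hl : l.Pairwise (· ≤ ·)) :
    ∀ x ∈ l.dropWhile (fun x => decide (x < v)), v ≤ x := by
  induction l with
  | nil => simp
  | cons h t ih =>
    rcases List.pairwise_cons.mp hl with ⟨hht, ht⟩
    by_cases hv : h < v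
    · rw [List.dropWhile_cons_of_pos (by simp [hv])]
      exact ih ht
    · rw [List.dropWhile_cons_of_neg (by simp [hv])]
      intro x hx
      rcases List.mem_cons.mp hx with rfl | hx'
      · exact le_of_not_gt hv
      · exact le_trans (le_of_not_gt hv) (hht x hx')

theorem takeWhile_eq_replicate (v : Int) (l : List Int) :
    l.takeWhile (fun x => x == v)
      = List.replicate (l.takeWhile (fun x => x == v)).length v := by
  apply List.eq_replicate_of_mem
  intro x hx
  have := List.mem_takeWhile_imp hx
  simpa using this

-- the heart of the proof: on sorted lists, the two-pointer merge computes
-- Σ_{n ∈ a} n * (count of n in b)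
theorem mergeRuns_eq (a b : List Int)
    (ha : a.Pairwise (· ≤ ·)) (hb : b.Pairwise (· ≤ ·)) :
    mergeRuns a b = (a.map (fun n => n * (b.count n : Int))).sum := by
  induction a, b using mergeRuns.induct with
  | case1 b => simp [mergeRuns]
  | case2 v t b x1 x2 x3 ih =>
    rcases List.pairwise_cons.mp ha with ⟨hta, hat⟩
    have ha'_def : x1 = List.dropWhile (fun x => x == v) t := by
      simp [x1]
    have ha'_gt : ∀ x ∈ x1, v < x := ha'_def ▸ dropWhile_eq_gt v t hat hta
    have ha'_pw : x1.Pairwise (· ≤ ·) := List.Pairwise.sublist (List.dropWhile_sublist _) ha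
    have hb1_ge : ∀ x ∈ x2, v ≤ x := dropWhile_lt_ge v b hb
    have hb1_pw : x2.Pairwise (· ≤ ·) := List.Pairwise.sublist (List.dropWhile_sublist _) hb
    have hb'_gt : ∀ x ∈ x3, v < x := dropWhile_eq_gt v x2 hb1_pw hb1_ge
    have hb'_pw : x3.Pairwise (· ≤ ·) := List.Pairwise.sublist (List.dropWhile_sublist _) hb1_pw
    set ca := ((v :: t).takeWhile (fun x => x == v)).length with hca
    set cb := (x2.takeWhile (fun x => x == v)).length with hcb
    have hasplit : (v :: t) = List.replicate ca v ++ x1 := by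
      rw [hca, ← takeWhile_eq_replicate]
      exact (List.takeWhile_append_dropWhile).symm
    have hbsplit : b = b.takeWhile (fun x => decide (x < v)) ++ x2 :=
      (List.takeWhile_append_dropWhile).symm
    have hb1split : x2 = List.replicate cb v ++ x3 := by
      rw [hcb, ← takeWhile_eq_replicate]
      exact (List.takeWhile_append_dropWhile).symm
    have hcount_p : ∀ w, v ≤ w →
        List.count w (b.takeWhile (fun x => decide (x < v))) = 0 := by
      intro w hw
      refine List.count_eq_zero.mpr (fun hmem => ?_)
      have := List.mem_takeWhile_imp hmem
      simp at this; omega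
    have hcountv : (List.count v b : Int) = (cb : Int) := by
      rw [hbsplit, hb1split, List.count_append, List.count_append,
        hcount_p v le_rfl, List.count_replicate,
        List.count_eq_zero.mpr (fun hm => lt_irrefl v (hb'_gt v hm))]
      simp
    have hcountw : ∀ w ∈ x1, List.count w b = List.count w x3 := by
      intro w hw
      have hvw : v < w := ha'_gt w hw
      rw [hbsplit, hb1split, List.count_append, List.count_append,
        hcount_p w (le_of_lt hvw), List.count_replicate]
      simp
      intro h; omega
    have hrun : mergeRuns (v :: t) b
        = v * (ca : Int) * (cb : Int) + mergeRuns x1 x3 := by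
      rw [mergeRuns]
    rw [hrun, ih ha'_pw hb'_pw]
    conv_rhs => rw [hasplit]
    rw [List.map_append, List.sum_append, List.map_replicate, List.sum_replicate,
      hcountv, nsmul_eq_mul]
    have : (List.map (fun n => n * (List.count n x3 : Int)) x1).sum
        = (List.map (fun n => n * (List.count n b : Int)) x1).sum := by
      congr 1
      exact List.map_congr_left (fun w hw => by rw [hcountw w hw])
    rw [this]
    ring_nf

-- ===== VERDICT (by name: the statement is the Claim_ definition above) =====
theorem work_p2_spec : Claim_equal_work_p2 := by
  intro inputs _ hpre
  unfold Spec_work_p2 work_p2 work_p2_alt readInputs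
  rw [readInputs_eq inputs hpre [] []]
  simp only [List.nil_append]
  set ll := (inputs.filterMap parseLine).map Prod.fst with hll
  set lr := (inputs.filterMap parseLine).map Prod.snd with hlr
  rw [PySem.List.foldl_add (g := fun n => n * (PySem.Dict.counter lr).getD n 0), zero_add]
  rw [mergeRuns_eq _ _ (PySem.List.sorted_pairwise ll (fun x => x) : _)
      (PySem.List.sorted_pairwise lr (fun x => x) : _)]
  have hperm : (PySem.List.sorted ll (fun x => x) false).Perm ll :=
    PySem.List.sorted_perm ll (fun x => x) false
  have hpermr : (PySem.List.sorted lr (fun x => x) false).Perm lr :=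
    PySem.List.sorted_perm lr (fun x => x) false
  rw [(hperm.map _).sum_eq]
  congr 1
  apply List.map_congr_left
  intro n _
  rw [PySem.Dict.getD_counter, hpermr.count_eq]
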